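-- pv_equiv track=rewrite | github.com/gaperez64/aoc | night13.py | first_ref
-- ===== SOURCE A (Python) =====
-- def bits_diff(b1, b2):
--     r = b1 ^ b2
--     return r.bit_count()
--
-- def first_ref(encs, diff=0):
--     for i in range(1, len(encs)):
--         start = max(0, 2 * i - len(encs))
--         end = min(len(encs), 2 * i)
--         l1 = encs[start:i]
--         l2 = reversed(encs[i:end])
--         totdiff = sum(map(lambda bs: bits_diff(*bs), zip(l1, l2)))
--         if totdiff == diff:
--             return i
--     return None
-- ===== SOURCE B (Python) =====
-- def first_ref(encs, diff=0):
--     # Bucket accumulation: every mirrored pair (j, k) with j < k and j + k odd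
--     # belongs to exactly one candidate fold line i = (j + k + 1) // 2; one pass
--     # over all such pairs fills a table of totals, then the table is scanned.
--     n = len(encs)
--     tot = [0] * n
--     for j in range(n):
--         for k in range(j + 1, n):
--             if (j + k) % 2 == 1:
--                 tot[(j + k + 1) // 2] += (encs[j] ^ encs[k]).bit_count()
--     for i in range(1, n):
--         if tot[i] == diff:
--             return i
--     return None
-- ===== Notes on version B (the rewrite author's own statement) =====
-- stated objective: alternative
-- what changed: Replaces the per-candidate slice/reverse/zip recomputation with a single staged pass over all index pairs with odd sum that accumulates each pair's bit-difference into a bucket table indexed by its unique mirror line, followed by a scan of the table.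
import Mathlib
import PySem

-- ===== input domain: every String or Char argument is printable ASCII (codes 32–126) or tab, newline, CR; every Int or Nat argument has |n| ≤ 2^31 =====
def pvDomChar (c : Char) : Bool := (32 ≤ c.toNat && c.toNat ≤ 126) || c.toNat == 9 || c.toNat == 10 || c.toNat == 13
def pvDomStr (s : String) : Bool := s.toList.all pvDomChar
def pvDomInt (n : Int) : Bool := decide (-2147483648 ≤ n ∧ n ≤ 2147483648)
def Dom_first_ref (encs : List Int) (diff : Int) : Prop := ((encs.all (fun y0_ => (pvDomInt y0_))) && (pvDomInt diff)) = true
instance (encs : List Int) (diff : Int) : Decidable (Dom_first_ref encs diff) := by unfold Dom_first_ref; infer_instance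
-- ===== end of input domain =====

-- B replaces A's per-candidate slice/reverse/zip summation with a staged pass: every odd-sum
-- index pair is accumulated once into a bucket table keyed by its mirror line, then the table
-- is scanned (objective: alternative; same asymptotic cost).

-- ===== PORT A =====
def bits_diff (b1 b2 : Int) : Int :=
  let r := PySem.Int.bxor b1 b2
  (PySem.Int.bitCount r : Int)

def firstRefGo (encs : List Int) (diff : Int) : List Int → Option Int
  | [] => none
  | i :: rest =>
    let n : Int := encs.length
    let start := max 0 (2 * i - n)
    let stop := min n (2 * i)
    let l1 := PySem.List.slice encs (some start) (some i)
    let l2 := (PySem.List.slice encs (some i) (some stop)).reverse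
    let totdiff := ((l1.zip l2).map (fun bs => bits_diff bs.1 bs.2)).sum
    if totdiff = diff then some i else firstRefGo encs diff rest

def first_ref (encs : List Int) (diff : Int) : Option Int :=
  firstRefGo encs diff (PySem.List.pyRange 1 (encs.length : Int) 1)

-- ===== PORT B =====
-- 'tot[(j+k+1)//2] += (encs[j]^encs[k]).bit_count()' — every index used is in range,
-- so the total forms pyGetD/pySetD are exact here
def bStep (encs : List Int) (j : Int) (tot : List Int) (k : Int) : List Int :=
  if PySem.Int.mod (j + k) 2 = 1 then
    PySem.List.pySetD tot (PySem.Int.floordiv (j + k + 1) 2)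
      (PySem.List.pyGetD tot (PySem.Int.floordiv (j + k + 1) 2) 0 +
      (PySem.Int.bitCount (PySem.Int.bxor (PySem.List.pyGetD encs j 0)
        (PySem.List.pyGetD encs k 0)) : Int))
  else tot

def bFill (encs : List Int) : List Int :=
  (PySem.List.pyRange 0 (encs.length : Int) 1).foldl
    (fun tot j =>
      (PySem.List.pyRange (j + 1) (encs.length : Int) 1).foldl (bStep encs j) tot)
    (List.replicate encs.length 0)

def bScan (tot : List Int) (diff : Int) : List Int → Option Int
  | [] => none
  | i :: rest =>
    if PySem.List.pyGetD tot i 0 = diff then some i else bScan tot diff rest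

def first_ref_alt (encs : List Int) (diff : Int) : Option Int :=
  bScan (bFill encs) diff (PySem.List.pyRange 1 (encs.length : Int) 1)

-- ===== PRECONDITION & SPEC =====
def Spec_first_ref (encs : List Int) (diff : Int) (out : Option Int) : Prop := out = first_ref_alt encs diff
instance (encs : List Int) (diff : Int) (out : Option Int) : Decidable (Spec_first_ref encs diff out) := by unfold Spec_first_ref; infer_instance

-- ===== CLAIM (what is proved, stated in full; the proofs are below) =====
def Claim_equal_first_ref : Prop := ∀ (encs : List Int) (diff : Int), Dom_first_ref encs diff → Spec_first_ref encs diff (first_ref encs diff)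

-- ===== LEMMAS AND PROOFS =====

-- the mirrored-pair list of candidate line i, as A computes it (before reversal)
def zl (encs : List Int) (i : Nat) : List Int :=
  ((encs.take i).reverse.zip (encs.drop i)).map (fun p => bits_diff p.1 p.2)

theorem length_bStep (encs : List Int) (j : Int) (tot : List Int) (k : Int) :
    (bStep encs j tot k).length = tot.length := by
  unfold bStep
  split_ifs with h
  · exact PySem.List.length_pySetD tot _ _
  · rfl

theorem length_innerFold (encs : List Int) (j : Int) (l : List Int) (tot : List Int) :
    (l.foldl (bStep encs j) tot).length = tot.length := by
  induction l generalizing tot with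
  | nil => rfl
  | cons k rest ih => rw [List.foldl_cons, ih, length_bStep]

-- effect of one inner step on bucket i
theorem bStep_getD (encs : List Int) (i : Nat) (j a : Int) (tot : List Int)
    (hlen : tot.length = encs.length) (hj : 0 ≤ j) (hja : j < a)
    (ha : a < (encs.length : Int)) :
    (bStep encs j tot a).getD i 0 = tot.getD i 0 +
      (if a = 2 * (i : Int) - 1 - j
        then bits_diff (encs.getD j.toNat 0) (encs.getD (2 * (i : Int) - 1 - j).toNat 0)
        else 0) := by
  unfold bStep
  rw [PySem.Int.mod_eq_emod_of_pos (by omega : (0:Int) < 2), PySem.Int.floordiv_eq_ediv_of_pos (by omega : (0:Int) < 2)]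
  split_ifs with hodd heq heq
  · -- odd pair, bucket equals i : the set hits index i
    have hb0 : 0 ≤ (j + a + 1) / 2 := by omega
    have hbi : ((j + a + 1) / 2).toNat = i := by omega
    rw [PySem.List.pySetD_of_nonneg _ _ hb0, hbi]
    have hilt : i < tot.length := by omega
    rw [PySem.List.pyGetD_of_nonneg _ _ hb0, hbi,
        PySem.List.pyGetD_of_nonneg _ _ hj, PySem.List.pyGetD_of_nonneg _ _ (by omega : (0:Int) ≤ a)]
    have hae : a.toNat = (2 * (i : Int) - 1 - j).toNat := by omega
    rw [List.getD_eq_getElem?_getD, List.getElem?_set_self (by omega), List.getD_eq_getElem?_getD,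
        Option.getD_some, hae]
    simp [bits_diff]
  · -- odd pair, other bucket : index i untouched
    have hb0 : 0 ≤ (j + a + 1) / 2 := by omega
    rw [PySem.List.pySetD_of_nonneg _ _ hb0]
    have hne : ((j + a + 1) / 2).toNat ≠ i := by omega
    rw [List.getD_eq_getElem?_getD, List.getElem?_set_ne hne, ← List.getD_eq_getElem?_getD]
    simp
  · -- even sum : the branch cannot be the partner
    exfalso; omega
  · simp

-- the inner loop over k adds exactly the (at most one) pair mirrored around i
theorem inner_getD (encs : List Int) (i : Nat) (j : Int) (hj : 0 ≤ j) :
    ∀ (a : Int) (tot : List Int), tot.length = encs.length → j < a →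
    ((PySem.List.pyRange a (encs.length : Int) 1).foldl (bStep encs j) tot).getD i 0 =
      tot.getD i 0 +
      (if a ≤ 2 * (i : Int) - 1 - j ∧ 2 * (i : Int) - 1 - j < (encs.length : Int)
        then bits_diff (encs.getD j.toNat 0) (encs.getD (2 * (i : Int) - 1 - j).toNat 0)
        else 0) := by
  intro a
  induction hn : ((encs.length : Int) - a).toNat generalizing a with
  | zero =>
    intro tot hlen hja
    rw [PySem.List.pyRange_one_eq_nil (by omega)]
    have : ¬ (a ≤ 2 * (i : Int) - 1 - j ∧ 2 * (i : Int) - 1 - j < (encs.length : Int)) := by omega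
    simp [this]
  | succ m ih =>
    intro tot hlen hja
    have halt : a < (encs.length : Int) := by omega
    rw [PySem.List.pyRange_one_cons halt, List.foldl_cons,
        ih (a + 1) (by omega) _ (by rw [length_bStep]; exact hlen) (by omega),
        bStep_getD encs i j a tot hlen hj hja halt]
    by_cases hP1 : a = 2 * (i : Int) - 1 - j
    · rw [if_pos hP1, if_neg (by omega : ¬(a + 1 ≤ 2 * (i : Int) - 1 - j ∧
          2 * (i : Int) - 1 - j < (encs.length : Int))),
          if_pos (by omega : a ≤ 2 * (i : Int) - 1 - j ∧ 2 * (i : Int) - 1 - j < (encs.length : Int))]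
      ring
    · rw [if_neg hP1]
      by_cases hP2 : a + 1 ≤ 2 * (i : Int) - 1 - j ∧ 2 * (i : Int) - 1 - j < (encs.length : Int)
      · rw [if_pos hP2, if_pos (by omega : a ≤ 2 * (i : Int) - 1 - j ∧
            2 * (i : Int) - 1 - j < (encs.length : Int))]
        ring
      · rw [if_neg hP2, if_neg (by omega : ¬(a ≤ 2 * (i : Int) - 1 - j ∧
            2 * (i : Int) - 1 - j < (encs.length : Int)))]
        ring

-- peeling the smallest j off the take-prefix of the mirrored-pair list
theorem zl_take_peel (encs : List Int) (i : Nat) (a : Int) (ha : 0 ≤ a)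
    (hi : i < encs.length) :
    (((zl encs i).take (((i : Int) - a).toNat)).sum : Int) =
      (if a + 1 ≤ 2 * (i : Int) - 1 - a ∧ 2 * (i : Int) - 1 - a < (encs.length : Int)
        then bits_diff (encs.getD a.toNat 0) (encs.getD (2 * (i : Int) - 1 - a).toNat 0)
        else 0) + ((zl encs i).take (((i : Int) - (a + 1)).toNat)).sum := by
  have hlen : (zl encs i).length = min i (encs.length - i) := by
    simp only [zl, List.length_map, List.length_zip, List.length_reverse, List.length_take,
      List.length_drop]
    omega
  by_cases hai : a < (i : Int)
  · set t : Nat := ((i : Int) - (a + 1)).toNat with ht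
    have hta : (((i : Int) - a).toNat) = t + 1 := by omega
    by_cases hcond : a + 1 ≤ 2 * (i : Int) - 1 - a ∧ 2 * (i : Int) - 1 - a < (encs.length : Int)
    · -- the pair (a, 2i-1-a) is in range: it is element t of zl
      have htl : t < (zl encs i).length := by
        rw [hlen]; omega
      have htake : i ≤ encs.length := by omega
      have h1 : i - 1 - t < (encs.take i).length := by simp; omega
      have h2 : t < (encs.drop i).length := by simp; omega
      have hz : (zl encs i)[t] = bits_diff (encs.getD a.toNat 0)
          (encs.getD (2 * (i : Int) - 1 - a).toNat 0) := by
        have e1 : (i - 1 - t) = a.toNat := by omega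
        have e2 : (i + t) = (2 * (i : Int) - 1 - a).toNat := by omega
        simp only [zl, List.getElem_map, List.getElem_zip, List.getElem_reverse,
          List.getElem_take, List.getElem_drop, List.length_take]
        rw [List.getD_eq_getElem _ _ (by omega : a.toNat < encs.length),
            List.getD_eq_getElem _ _ (by omega : (2 * (i : Int) - 1 - a).toNat < encs.length)]
        congr 2 <;> omega
      rw [hta, if_pos hcond, List.sum_take_succ _ t htl]
      simp only [hz]
      ring
    · -- the pair is out of range: both prefixes are the whole list
      have hm : (zl encs i).length ≤ t := by rw [hlen]; omega
      rw [hta, List.take_of_length_le hm, List.take_of_length_le (by omega), if_neg hcond]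
      simp
  · have h0 : (((i : Int) - a).toNat) = 0 := by omega
    have h1 : (((i : Int) - (a + 1)).toNat) = 0 := by omega
    have : ¬ (a + 1 ≤ 2 * (i : Int) - 1 - a ∧ 2 * (i : Int) - 1 - a < (encs.length : Int)) := by
      omega
    rw [h0, h1, if_neg this]
    simp

-- the outer loop from j = a onward adds the prefix of zl whose first index is ≥ a
theorem outer_getD (encs : List Int) (i : Nat) (hi : i < encs.length) :
    ∀ (a : Int) (tot : List Int), 0 ≤ a → tot.length = encs.length →
    ((PySem.List.pyRange a (encs.length : Int) 1).foldl
        (fun tot j =>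
          (PySem.List.pyRange (j + 1) (encs.length : Int) 1).foldl (bStep encs j) tot)
        tot).getD i 0 =
      tot.getD i 0 + ((zl encs i).take (((i : Int) - a).toNat)).sum := by
  intro a
  induction hn : ((encs.length : Int) - a).toNat generalizing a with
  | zero =>
    intro tot ha hlen
    rw [PySem.List.pyRange_one_eq_nil (by omega)]
    have h0 : (((i : Int) - a).toNat) = 0 := by omega
    simp [h0]
  | succ m ih =>
    intro tot ha hlen
    have halt : a < (encs.length : Int) := by omega
    rw [PySem.List.pyRange_one_cons halt, List.foldl_cons,
        ih (a + 1) (by omega) _ (by omega) (by rw [length_innerFold]; exact hlen),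
        inner_getD encs i a ha (a + 1) tot hlen (by omega),
        zl_take_peel encs i a ha hi]
    ring

theorem bFill_getD (encs : List Int) (i : Nat) (hi : i < encs.length) :
    (bFill encs).getD i 0 = (zl encs i).sum := by
  unfold bFill
  rw [outer_getD encs i hi 0 _ le_rfl (List.length_replicate)]
  have hall : (zl encs i).length ≤ (((i : Int) - 0).toNat) := by
    simp only [zl, List.length_map, List.length_zip, List.length_reverse, List.length_take,
      List.length_drop]
    omega
  rw [List.take_of_length_le hall, List.getD_eq_getElem?_getD]
  simp

-- the reflected zip identity: A's (l1, reversed l2) pairs are zl's pairs, reversed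
theorem zip_reflect (xs : List Int) (k m : Nat) (hk : k ≤ xs.length)
    (hm : m = min k (xs.length - k)) :
    ((xs.drop (k - m)).take m).zip (((xs.drop k).take m).reverse) =
      ((xs.take k).reverse.zip (xs.drop k)).reverse := by
  apply List.ext_getElem
  · simp; omega
  · intro j h1 h2
    simp at h1 h2
    simp only [List.getElem_zip, List.getElem_reverse, List.getElem_take, List.getElem_drop,
      List.length_zip, List.length_reverse, List.length_take, List.length_drop] at *
    simp only [Prod.mk.injEq]
    refine ⟨?_, ?_⟩ <;> · congr 1; omega

-- A's per-candidate slice/zip sum is the sum of zl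
theorem a_inner (encs : List Int) (i : Int) (h1 : 1 ≤ i) (h2 : i < (encs.length : Int)) :
    (((PySem.List.slice encs (some (max 0 (2 * i - (encs.length : Int)))) (some i)).zip
        ((PySem.List.slice encs (some i) (some (min (encs.length : Int) (2 * i)))).reverse)).map
      (fun bs => bits_diff bs.1 bs.2)).sum = (zl encs i.toNat).sum := by
  have hs1 : PySem.List.slice encs (some (max 0 (2 * i - (encs.length : Int)))) (some i) =
      (encs.drop (i.toNat - min i.toNat (encs.length - i.toNat))).take
        (min i.toNat (encs.length - i.toNat)) := by
    rw [PySem.List.slice_toNat encs (by omega) (by omega)]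
    have ha : (max 0 (2 * i - (encs.length : Int))).toNat =
        i.toNat - min i.toNat (encs.length - i.toNat) := by omega
    rw [ha]
    congr 1
    omega
  have hs2 : PySem.List.slice encs (some i) (some (min (encs.length : Int) (2 * i))) =
      (encs.drop i.toNat).take (min i.toNat (encs.length - i.toNat)) := by
    rw [PySem.List.slice_toNat encs (by omega) (by omega)]
    congr 1
    omega
  rw [hs1, hs2, zip_reflect encs i.toNat (min i.toNat (encs.length - i.toNat)) (by omega) rfl]
  rw [List.map_reverse, List.sum_reverse]
  rfl

theorem go_eq (encs : List Int) (diff : Int) :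
    ∀ l : List Int, (∀ i ∈ l, 1 ≤ i ∧ i < (encs.length : Int)) →
    firstRefGo encs diff l = bScan (bFill encs) diff l := by
  intro l hl
  induction l with
  | nil => rfl
  | cons i rest ih =>
    obtain ⟨hi1, hi2⟩ := hl i (by simp)
    have hb : PySem.List.pyGetD (bFill encs) i 0 = (zl encs i.toNat).sum := by
      rw [PySem.List.pyGetD_of_nonneg _ _ (by omega : (0:Int) ≤ i),
          bFill_getD encs i.toNat (by omega)]
    simp only [firstRefGo, bScan, a_inner encs i hi1 hi2, hb]
    exact if_congr Iff.rfl rfl (ih fun j hj => hl j (by simp [hj]))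

-- ===== VERDICT (by name: the statement is the Claim_ definition above) =====
theorem first_ref_spec : Claim_equal_first_ref := by
  intro encs diff _
  unfold Spec_first_ref first_ref first_ref_alt
  exact go_eq encs diff _ (fun i hi => (PySem.List.mem_pyRange_one.1 hi))
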